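-- pv_equiv track=rewrite | github.com/borhanDZ/unification_function | unification_2020.py | isConst
-- ===== SOURCE A (Python) =====
-- def isConst(c):
--    i,const = 0,False
--    while i in range(len(c)):
--       if (c[i] >= 'a' and c[i] <= 'z') or (c[i] >= '1' and c[i] <= '9'):
--          const = True
--       else:
--          return False
--       i+=1
--    return const
-- ===== SOURCE B (Python) =====
-- import re
--
-- _CONST_RE = re.compile(r'[a-z1-9]+')
--
-- def isConst(c):
--     return bool(_CONST_RE.fullmatch(c))
-- ===== Notes on version B (the rewrite author's own statement) =====
-- stated objective: faster
-- what changed: Replaces the manual index-driven while-loop with a carried flag and early return by a single precompiled regular-expression fullmatch against [a-z1-9]+, which encodes both the character test and the non-emptiness requirement.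
import Mathlib
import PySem

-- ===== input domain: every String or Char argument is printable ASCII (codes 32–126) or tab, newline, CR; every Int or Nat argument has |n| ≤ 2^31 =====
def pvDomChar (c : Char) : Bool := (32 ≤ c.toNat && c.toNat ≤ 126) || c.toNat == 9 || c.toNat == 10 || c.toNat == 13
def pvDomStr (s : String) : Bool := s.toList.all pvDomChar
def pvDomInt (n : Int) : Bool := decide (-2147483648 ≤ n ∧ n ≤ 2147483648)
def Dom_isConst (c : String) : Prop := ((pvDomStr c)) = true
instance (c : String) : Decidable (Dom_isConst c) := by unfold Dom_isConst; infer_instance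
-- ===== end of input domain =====

-- B replaces A's index-driven while-loop (flag + early return) by one regex fullmatch
-- against [a-z1-9]+ (idiomatic; measurably faster at large sizes in a timing run).


-- ===== PORT A =====
-- A's while-loop over index i with the carried flag `const`; ported as structural
-- recursion over the remaining characters, carrying `const`.
def isConstGo (l : List Char) (const : Bool) : Bool :=
  match l with
  | [] => const
  | ch :: rest =>
      if (('a' ≤ ch && ch ≤ 'z') || ('1' ≤ ch && ch ≤ '9')) then isConstGo rest true
      else false

def isConst (c : String) : Bool := isConstGo c.toList false

-- ===== PORT B =====
-- Source B's `re.fullmatch(r'[a-z1-9]+', c)`: the regex has no native PySem primitive, so it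
-- is ported by its exact meaning on any string: non-empty and every character in the
-- class [a-z1-9].
def isConst_alt (c : String) : Bool :=
  !c.toList.isEmpty &&
    c.toList.all (fun ch => ('a' ≤ ch && ch ≤ 'z') || ('1' ≤ ch && ch ≤ '9'))

-- ===== PRECONDITION & SPEC =====
def Spec_isConst (c : String) (out : Bool) : Prop := out = isConst_alt c
instance (c : String) (out : Bool) : Decidable (Spec_isConst c out) := by unfold Spec_isConst; infer_instance

-- ===== CLAIM (what is proved, stated in full; the proofs are below) =====
def Claim_equal_isConst : Prop := ∀ (c : String), Dom_isConst c → Spec_isConst c (isConst c)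

-- ===== LEMMAS AND PROOFS =====
theorem isConstGo_true (l : List Char) :
    isConstGo l true = l.all (fun ch => ('a' ≤ ch && ch ≤ 'z') || ('1' ≤ ch && ch ≤ '9')) := by
  induction l with
  | nil => rfl
  | cons ch rest ih =>
      simp only [isConstGo, List.all_cons]
      cases h : (('a' ≤ ch && ch ≤ 'z') || ('1' ≤ ch && ch ≤ '9')) <;> simp [ih]

-- ===== VERDICT (by name: the statement is the Claim_ definition above) =====
theorem isConst_spec : Claim_equal_isConst := by
  intro c _
  unfold Spec_isConst isConst isConst_alt
  cases hl : c.toList with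
  | nil => rfl
  | cons ch rest =>
      simp only [isConstGo, List.isEmpty_cons, Bool.not_false, Bool.true_and, List.all_cons]
      cases h : (('a' ≤ ch && ch ≤ 'z') || ('1' ≤ ch && ch ≤ '9')) <;> simp [isConstGo_true]
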